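-- pv_equiv track=rewrite | github.com/queelius/computational-explorations | src/primitive_extended.py | _factorize_with_spf
-- ===== SOURCE A (Python) =====
-- from typing import Dict, List, Set, Tuple, Any
--
-- def _factorize_with_spf(x: int, spf: List[int]) -> Dict[int, int]:
--     """Factorize x using precomputed smallest-prime-factor table."""
--     factors = {}
--     while x > 1:
--         p = spf[x]
--         e = 0
--         while x % p == 0:
--             x //= p
--             e += 1
--         factors[p] = e
--     return factors
-- ===== SOURCE B (Python) =====
-- def _factorize_with_spf(x, spf):
--     """Factorize x: record the chain of smallest prime factors met while
--     dividing x down to 1, then count each prime's multiplicity in the chain."""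
--     chain = []
--     while x > 1:
--         p = spf[x]
--         chain.append(p)
--         x //= p
--     return {p: chain.count(p) for p in dict.fromkeys(chain)}
-- ===== Notes on version B (the rewrite author's own statement) =====
-- stated objective: simpler
-- what changed: Instead of nested loops inserting exponents into the dict as it divides, B first materialises the list of smallest-prime-factor values met while dividing x to 1, then builds the result in a second stage as {p: chain.count(p)} over the order-preserving dedup of that chain.
-- outside the precondition, e.g. on _factorize_with_spf(12, [0, 0, 2, 3, 2, 5, 6, 7, 2, 3, 2, 11, 2]): A returns {2: 2, 3: 1}, B returns {2: 1, 6: 1}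
import Mathlib
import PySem

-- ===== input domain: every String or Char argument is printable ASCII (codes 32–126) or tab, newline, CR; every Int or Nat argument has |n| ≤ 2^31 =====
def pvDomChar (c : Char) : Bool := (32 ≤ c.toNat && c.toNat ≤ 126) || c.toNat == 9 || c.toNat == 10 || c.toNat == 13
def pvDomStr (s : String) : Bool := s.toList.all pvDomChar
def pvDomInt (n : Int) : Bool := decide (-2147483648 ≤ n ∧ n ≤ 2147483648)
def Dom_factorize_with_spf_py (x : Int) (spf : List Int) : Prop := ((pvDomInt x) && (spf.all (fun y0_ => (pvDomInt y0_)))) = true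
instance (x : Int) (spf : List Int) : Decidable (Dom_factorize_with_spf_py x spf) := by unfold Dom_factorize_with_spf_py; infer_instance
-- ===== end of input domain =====

-- B replaces A's nested division loops by two stages: record the chain of spf values met while
-- dividing x to 1, then build {p: chain.count(p)} over the ordered dedup of the chain (objective: simpler).

-- ===== PORT A =====
-- inner 'while x % p == 0: x //= p; e += 1' (fuel-guarded for totality; fuel suffices on Pre_)
def pvAInner (p : Int) : Nat → Int → Int → Int × Int
  | 0, x, e => (x, e)
  | fuel+1, x, e =>
    if PySem.Int.mod x p = 0 then
      pvAInner p fuel (PySem.Int.floordiv x p) (e + 1)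
    else
      (x, e)

-- outer 'while x > 1' (fuel-guarded; 'none' from spf[x] is Python's IndexError, excluded by Pre_)
def pvALoop (spf : List Int) : Nat → Int → PySem.Dict Int Int → PySem.Dict Int Int
  | 0, _, factors => factors
  | fuel+1, x, factors =>
    if 1 < x then
      match PySem.List.pyGet? spf x with
      | none => factors
      | some p =>
        match pvAInner p fuel x 0 with
        | (x', e) => pvALoop spf fuel x' (factors.insert p e)
    else factors

def factorize_with_spf_py (x : Int) (spf : List Int) : List (Int × Int) :=
  (pvALoop spf (x.toNat + 1) x PySem.Dict.empty).items

-- ===== PORT B =====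
-- stage 1: 'chain = []; while x > 1: p = spf[x]; chain.append(p); x //= p' (fuel-guarded)
def pvChain (spf : List Int) : Nat → Int → List Int → List Int
  | 0, _, chain => chain
  | fuel+1, x, chain =>
    if 1 < x then
      match PySem.List.pyGet? spf x with
      | none => chain
      | some p => pvChain spf fuel (PySem.Int.floordiv x p) (chain ++ [p])
    else chain

-- stage 2: '{p: chain.count(p) for p in dict.fromkeys(chain)}'
def factorize_with_spf_py_alt (x : Int) (spf : List Int) : List (Int × Int) :=
  let chain := pvChain spf (x.toNat + 1) x []
  ((PySem.List.dedup chain).foldl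
      (fun d p => d.insert p ((PySem.List.count chain p : Int))) PySem.Dict.empty).items

-- ===== PRECONDITION & SPEC =====
-- Pre_ excludes x > 1 with an spf that is not a genuine smallest-prime-factor table covering x (out-of-range
-- index, or some entry not the least divisor ≥ 2 of its index): there A raises (IndexError/ZeroDivisionError),
-- loops forever, or returns accidental values of its exhaust-one-prime-at-a-time traversal.
def Pre_factorize_with_spf_py (x : Int) (spf : List Int) : Prop :=
  x ≤ 1 ∨ (x.toNat < spf.length ∧
    ∀ i < spf.length, 2 ≤ i →
      2 ≤ spf.getD i 0 ∧ spf.getD i 0 ∣ (i : Int) ∧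
        ∀ d < (spf.getD i 0).toNat, 2 ≤ d → ¬ ((d : Int) ∣ (i : Int)))
instance (x : Int) (spf : List Int) : Decidable (Pre_factorize_with_spf_py x spf) := by
  unfold Pre_factorize_with_spf_py; infer_instance
def pvWitness_factorize_with_spf_py : Int × List Int := (4, [0, 0, 2, 3, 2])
def Spec_factorize_with_spf_py (x : Int) (spf : List Int) (out : List (Int × Int)) : Prop := out = factorize_with_spf_py_alt x spf
instance (x : Int) (spf : List Int) (out : List (Int × Int)) : Decidable (Spec_factorize_with_spf_py x spf out) := by unfold Spec_factorize_with_spf_py; infer_instance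

-- ===== CLAIM (what is proved, stated in full; the proofs are below) =====
def Claim_equal_factorize_with_spf_py : Prop := ∀ (x : Int) (spf : List Int), Dom_factorize_with_spf_py x spf → Pre_factorize_with_spf_py x spf → Spec_factorize_with_spf_py x spf (factorize_with_spf_py x spf)

-- ===== LEMMAS AND PROOFS =====

-- the table condition of Pre_, named for the proofs
def pvSpfGood (spf : List Int) : Prop :=
  ∀ i < spf.length, 2 ≤ i →
    2 ≤ spf.getD i 0 ∧ spf.getD i 0 ∣ (i : Int) ∧
      ∀ d < (spf.getD i 0).toNat, 2 ≤ d → ¬ ((d : Int) ∣ (i : Int))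

-- p is the least divisor ≥ 2 of x
def pvMinDiv (p x : Int) : Prop := p ∣ x ∧ ∀ d : Int, 2 ≤ d → d ∣ x → p ≤ d

theorem pv_fd_exact (p m : Int) (hp : 0 < p) : PySem.Int.floordiv (p * m) p = m := by
  rw [PySem.Int.floordiv_eq_ediv_of_pos hp]
  exact Int.mul_ediv_cancel_left _ (ne_of_gt hp)

theorem pv_good_at (spf : List Int) (hg : pvSpfGood spf) (x : Int) (hx2 : 2 ≤ x)
    (hxn : x.toNat < spf.length) :
    2 ≤ spf.getD x.toNat 0 ∧ pvMinDiv (spf.getD x.toNat 0) x := by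
  obtain ⟨h1, h2, h3⟩ := hg x.toNat hxn (by omega)
  have hx : ((x.toNat : Int)) = x := by omega
  rw [hx] at h2 h3
  refine ⟨h1, h2, fun d hd2 hdvd => ?_⟩
  by_contra hlt
  exact h3 d.toNat (by omega) (by omega) (by rwa [show ((d.toNat : Int)) = d by omega])

theorem pv_min_uniq (p q x : Int) (hp : 2 ≤ p) (hq : 2 ≤ q)
    (h1 : pvMinDiv p x) (h2 : pvMinDiv q x) : p = q :=
  le_antisymm (h1.2 q hq h2.1) (h2.2 p hp h1.1)

theorem pv_lookup (spf : List Int) (x : Int) (hx0 : 0 ≤ x) (hxn : x.toNat < spf.length) :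
    PySem.List.pyGet? spf x = some (spf.getD x.toNat 0) := by
  rw [PySem.List.pyGet?_eq_some_getElem spf hx0 (by omega), List.getD_eq_getElem spf 0 hxn]

theorem pv_aLoop_exit (spf : List Int) (x : Int) (F : PySem.Dict Int Int) (hx : ¬ 1 < x) :
    ∀ fuel, pvALoop spf fuel x F = F := by
  intro fuel; cases fuel <;> simp [pvALoop, hx]

theorem pv_chain_exit (spf : List Int) (x : Int) (c : List Int) (hx : ¬ 1 < x) :
    ∀ fuel, pvChain spf fuel x c = c := by
  intro fuel; cases fuel <;> simp [pvChain, hx]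

theorem pv_chain_acc (spf : List Int) :
    ∀ fuel (x : Int) (c : List Int), pvChain spf fuel x c = c ++ pvChain spf fuel x [] := by
  intro fuel
  induction fuel with
  | zero => intro x c; simp [pvChain]
  | succ fuel ih =>
    intro x c
    by_cases h1 : 1 < x
    · cases hp : PySem.List.pyGet? spf x with
      | none => simp [pvChain, h1, hp]
      | some p =>
        simp only [pvChain, if_pos h1, hp, List.nil_append]
        rw [ih (PySem.Int.floordiv x p) (c ++ [p]), ih (PySem.Int.floordiv x p) [p]]
        simp
    · simp [pvChain, h1]

theorem pv_chain_fuel (spf : List Int) (hg : pvSpfGood spf) :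
    ∀ N (x : Int) fa fb, x.toNat ≤ N → (1 < x → x.toNat < spf.length) →
      x.toNat ≤ fa → x.toNat ≤ fb → pvChain spf fa x [] = pvChain spf fb x [] := by
  intro N
  induction N with
  | zero =>
    intro x fa fb hN hx _ _
    rw [pv_chain_exit spf x [] (by omega), pv_chain_exit spf x [] (by omega)]
  | succ N ih =>
    intro x fa fb hN hx hfa hfb
    by_cases h1 : 1 < x
    · have hxn := hx h1
      obtain ⟨fa, rfl⟩ : ∃ f, fa = f + 1 := ⟨fa - 1, by omega⟩
      obtain ⟨fb, rfl⟩ : ∃ f, fb = f + 1 := ⟨fb - 1, by omega⟩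
      obtain ⟨hp2, hpd, _⟩ := pv_good_at spf hg x (by omega) hxn
      obtain ⟨m, hm⟩ := hpd
      have hm1 : 1 ≤ m := by
        by_contra h
        have : spf.getD x.toNat 0 * m ≤ 0 :=
          mul_nonpos_of_nonneg_of_nonpos (by omega) (by omega)
        omega
      have hmx : m < x := by
        have h2m : 2 * m ≤ spf.getD x.toNat 0 * m := by
          exact mul_le_mul_of_nonneg_right hp2 (by omega)
        omega
      have hfd := pv_fd_exact (spf.getD x.toNat 0) m (by omega)
      rw [← hm] at hfd
      simp only [pvChain, h1, if_pos, pv_lookup spf x (by omega) hxn, hfd, List.nil_append]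
      rw [pv_chain_acc spf fa _ [spf.getD x.toNat 0], pv_chain_acc spf fb _ [spf.getD x.toNat 0]]
      rw [ih m fa fb (by omega) (by omega) (by omega) (by omega)]
    · rw [pv_chain_exit spf x [] h1, pv_chain_exit spf x [] h1]

-- every element of the chain of y divides y
theorem pv_chain_dvd (spf : List Int) (hg : pvSpfGood spf) :
    ∀ N (y : Int) fc, y.toNat ≤ N → (1 < y → y.toNat < spf.length) →
      ∀ q ∈ pvChain spf fc y [], q ∣ y := by
  intro N
  induction N with
  | zero =>
    intro y fc hN hy q hq
    rw [pv_chain_exit spf y [] (by omega)] at hq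
    cases hq
  | succ N ih =>
    intro y fc hN hy q hq
    by_cases h1 : 1 < y
    · have hyn := hy h1
      obtain ⟨fc, rfl⟩ : ∃ f, fc = f + 1 := by
        cases fc with
        | zero => rw [pvChain] at hq; cases hq
        | succ f => exact ⟨f, rfl⟩
      obtain ⟨hp2, hpd, _⟩ := pv_good_at spf hg y (by omega) hyn
      obtain ⟨m, hm⟩ := hpd
      have hm1 : 1 ≤ m := by
        by_contra h
        have : spf.getD y.toNat 0 * m ≤ 0 :=
          mul_nonpos_of_nonneg_of_nonpos (by omega) (by omega)
        omega
      have hmx : m < y := by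
        have h2m : 2 * m ≤ spf.getD y.toNat 0 * m := mul_le_mul_of_nonneg_right hp2 (by omega)
        omega
      have hfd := pv_fd_exact (spf.getD y.toNat 0) m (by omega)
      rw [← hm] at hfd
      simp only [pvChain, h1, if_pos, pv_lookup spf y (by omega) hyn, hfd,
        List.nil_append] at hq
      rw [pv_chain_acc spf fc m [spf.getD y.toNat 0]] at hq
      rcases List.mem_append.mp hq with h | h
      · have : q = spf.getD y.toNat 0 := by simpa using h
        exact this ▸ ⟨m, hm⟩
      · exact (ih m fc (by omega) (fun _ => by omega) q h).trans
          (hm.symm ▸ dvd_mul_left m (spf.getD y.toNat 0))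
    · rw [pv_chain_exit spf y [] h1] at hq
      cases hq

-- pulling k equal divisions off the chain
theorem pv_chain_pump (spf : List Int) (hg : pvSpfGood spf) (p : Int) (hp : 2 ≤ p) :
    ∀ (k : Nat) (y : Int) (fc : Nat),
      1 ≤ y → (1 < y → y.toNat < spf.length) →
      (0 < k → (p ^ k * y).toNat < spf.length ∧ pvMinDiv p (p ^ k * y)) →
      (p ^ k * y).toNat ≤ fc →
      pvChain spf fc (p ^ k * y) [] = List.replicate k p ++ pvChain spf y.toNat y [] := by
  intro k
  induction k with
  | zero =>
    intro y fc hy1 hyn _ hfc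
    simp only [pow_zero, one_mul, List.replicate_zero, List.nil_append] at hfc ⊢
    exact pv_chain_fuel spf hg y.toNat y fc y.toNat le_rfl hyn hfc le_rfl
  | succ k ih =>
    intro y fc hy1 hyn hstage hfc
    obtain ⟨hxn, hmd⟩ := hstage (by omega)
    have hpk : (1 : Int) ≤ p ^ k := one_le_pow₀ (by omega)
    have hpky1 : (1 : Int) ≤ p ^ k * y := by
      have := mul_le_mul hpk hy1 zero_le_one (by omega)
      simpa using this
    have hsplit : p ^ (k + 1) * y = p * (p ^ k * y) := by ring
    have hmul : 2 * (p ^ k * y) ≤ p ^ (k + 1) * y := by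
      rw [hsplit]; exact mul_le_mul_of_nonneg_right hp (by omega)
    have hx2 : 2 ≤ p ^ (k + 1) * y := by omega
    obtain ⟨fc, rfl⟩ : ∃ f, fc = f + 1 := ⟨fc - 1, by omega⟩
    obtain ⟨hq2, hqmd⟩ := pv_good_at spf hg (p ^ (k + 1) * y) hx2 hxn
    have hqp : spf.getD (p ^ (k + 1) * y).toNat 0 = p :=
      pv_min_uniq _ p _ hq2 hp hqmd hmd
    simp only [pvChain, if_pos (show (1:Int) < p ^ (k+1) * y by omega),
      pv_lookup spf _ (by omega) hxn, hqp, List.nil_append]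
    rw [hsplit, pv_fd_exact p (p ^ k * y) (by omega)]
    rw [pv_chain_acc spf fc _ [p]]
    rw [ih y fc hy1 hyn ?stage (by omega)]
    case stage =>
      intro hk
      refine ⟨by omega, ⟨dvd_mul_of_dvd_left (dvd_pow_self p (by omega)) y, ?_⟩⟩
      intro d hd2 hdd
      exact hmd.2 d hd2 (hdd.trans ⟨p, by rw [hsplit]; ring⟩)
    rw [List.replicate_succ]
    simp

-- Set.add with a fresh head commutes out of the fold
theorem pv_add_cons (x : Int) :
    ∀ (l : List Int) (s : PySem.Set Int), x ∉ l →
      l.foldl PySem.Set.add (x :: s) = x :: l.foldl PySem.Set.add s := by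
  intro l
  induction l with
  | nil => intro s _; rfl
  | cons y t ih =>
    intro s hx
    have hxy : x ≠ y := fun h => hx (h ▸ List.mem_cons_self)
    have hxt : x ∉ t := fun h => hx (List.mem_cons_of_mem y h)
    have hadd : PySem.Set.add (x :: s) y = x :: PySem.Set.add s y := by
      simp only [PySem.Set.add, PySem.Set.contains, List.contains_cons]
      have : (y == x) = false := by simpa using (Ne.symm hxy)
      rw [this]
      simp only [Bool.false_or]
      split_ifs <;> simp
    rw [List.foldl_cons, hadd, List.foldl_cons, ih _ hxt]

theorem pv_fold_add_replicate (p : Int) :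
    ∀ k : Nat, (List.replicate k p).foldl PySem.Set.add [p] = [p] := by
  intro k
  induction k with
  | zero => rfl
  | succ k ih =>
    rw [List.replicate_succ, List.foldl_cons]
    have : PySem.Set.add [p] p = [p] := by
      simp [PySem.Set.add, PySem.Set.contains]
    rw [this, ih]

theorem pv_dedup_decomp (p : Int) (k : Nat) (c : List Int) (hk : 0 < k) (hp : p ∉ c) :
    PySem.List.dedup (List.replicate k p ++ c) = p :: PySem.List.dedup c := by
  obtain ⟨k, rfl⟩ : ∃ j, k = j + 1 := ⟨k - 1, by omega⟩
  simp only [PySem.List.dedup, PySem.Set.ofList, List.foldl_append]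
  rw [List.replicate_succ, List.foldl_cons]
  have h0 : PySem.Set.add PySem.Set.empty p = [p] := rfl
  rw [h0, pv_fold_add_replicate p k]
  simpa [PySem.List.dedup, PySem.Set.ofList, PySem.Set.empty] using pv_add_cons p c [] hp

theorem pv_aInner_spec (p : Int) (hp : 2 ≤ p) :
    ∀ fuel (x e : Int), 1 ≤ x → x.toNat ≤ fuel + 1 →
      ∃ (k : Nat) (y : Int), pvAInner p fuel x e = (y, e + (k : Int)) ∧
        x = p ^ k * y ∧ 1 ≤ y ∧ ¬ p ∣ y := by
  intro fuel
  induction fuel with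
  | zero =>
    intro x e hx1 hxf
    have hx : x = 1 := by omega
    refine ⟨0, 1, ?_, by simp [hx], by omega, ?_⟩
    · simp [pvAInner, hx]
    · intro h
      have := Int.le_of_dvd one_pos h
      omega
  | succ fuel ih =>
    intro x e hx1 hxf
    by_cases hdvd : p ∣ x
    · obtain ⟨m, hm⟩ := hdvd
      have hm1 : 1 ≤ m := by
        by_contra h
        have : p * m ≤ 0 := mul_nonpos_of_nonneg_of_nonpos (by omega) (by omega)
        omega
      have hmx : m < x := by
        have h2m : 2 * m ≤ p * m := mul_le_mul_of_nonneg_right hp (by omega)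
        omega
      have hmod : PySem.Int.mod x p = 0 := (PySem.Int.mod_eq_zero_iff_dvd x p).mpr ⟨m, hm⟩
      obtain ⟨k, y, heq, hxy, hy1, hny⟩ := ih m (e + 1) hm1 (by omega)
      refine ⟨k + 1, y, ?_, ?_, hy1, hny⟩
      · simp only [pvAInner, hmod, if_pos]
        rw [hm, pv_fd_exact p m (by omega), heq]
        congr 1
        push_cast
        omega
      · rw [hm, hxy]; ring
    · have hmod : PySem.Int.mod x p ≠ 0 := fun h => hdvd ((PySem.Int.mod_eq_zero_iff_dvd x p).mp h)
      refine ⟨0, x, ?_, by simp, hx1, hdvd⟩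
      simp [pvAInner, hmod]

-- MAIN: A's dict loop equals B's count-over-dedup fold
theorem pv_main (spf : List Int) (hg : pvSpfGood spf) :
    ∀ N (x : Int) (F : PySem.Dict Int Int) fa fc, x.toNat ≤ N →
      (1 < x → x.toNat < spf.length) → x.toNat ≤ fa → x.toNat ≤ fc →
      (∀ q : Int, F.contains q = true → ¬ q ∣ x) →
      pvALoop spf fa x F =
        (PySem.List.dedup (pvChain spf fc x [])).foldl
          (fun d p => d.insert p ((PySem.List.count (pvChain spf fc x []) p : Int))) F := by
  intro N
  induction N with
  | zero =>
    intro x F fa fc hN hx _ _ _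
    rw [pv_aLoop_exit spf x F (by omega), pv_chain_exit spf x [] (by omega)]
    rfl
  | succ N ih =>
    intro x F fa fc hN hx hfa hfc hF
    by_cases h1 : 1 < x
    · have hxn := hx h1
      obtain ⟨fa, rfl⟩ : ∃ f, fa = f + 1 := ⟨fa - 1, by omega⟩
      obtain ⟨hp2, hpmd⟩ := pv_good_at spf hg x (by omega) hxn
      set p := spf.getD x.toNat 0 with hpdef
      obtain ⟨k, y, heq, hxy, hy1, hny⟩ := pv_aInner_spec p hp2 fa x 0 (by omega) (by omega)
      have hk1 : 0 < k := by
        rcases Nat.eq_zero_or_pos k with h | h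
        · subst h; simp at hxy; exact absurd (hxy ▸ hpmd.1) hny
        · exact h
      have hyx : y < x := by
        have hpk : (1 : Int) ≤ p ^ k := one_le_pow₀ (by omega)
        have hpk2 : (2 : Int) ≤ p ^ k := by
          calc (2 : Int) ≤ p := hp2
          _ ≤ p ^ k := le_self_pow₀ (by omega) (by omega)
        have : 2 * y ≤ p ^ k * y := mul_le_mul_of_nonneg_right hpk2 (by omega)
        omega
      have hydvd : y ∣ x := hxy ▸ dvd_mul_left y (p ^ k)
      -- B's chain decomposes as k copies of p then the chain of y
      have hchain : pvChain spf fc x [] = List.replicate k p ++ pvChain spf y.toNat y [] := by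
        rw [hxy]
        exact pv_chain_pump spf hg p hp2 k y fc hy1 (fun _ => by omega)
          (fun _ => ⟨by rw [← hxy]; omega, by rw [← hxy]; exact hpmd⟩) (by rw [← hxy]; omega)
      set c := pvChain spf y.toNat y [] with hcdef
      have hcdvd : ∀ q ∈ c, q ∣ y := pv_chain_dvd spf hg y.toNat y y.toNat le_rfl (fun _ => by omega)
      have hpc : p ∉ c := fun h => hny (hcdvd p h)
      -- counts over the full chain
      have hcountp : PySem.List.count (pvChain spf fc x []) p = k := by
        rw [hchain, PySem.List.count_eq, List.count_append, List.count_replicate_self,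
          List.count_eq_zero.mpr hpc]
        omega
      have hcountq : ∀ q ∈ c, PySem.List.count (pvChain spf fc x []) q = PySem.List.count c q := by
        intro q hq
        have hqp : q ≠ p := fun h => hny (h ▸ hcdvd q hq)
        rw [hchain, PySem.List.count_eq, PySem.List.count_eq, List.count_append,
          List.count_replicate, if_neg (by simpa using (Ne.symm hqp))]
        omega
      -- A takes one outer step: inner loop gives (y, 0 + k)
      simp only [pvALoop, if_pos h1, pv_lookup spf x (by omega) hxn, ← hpdef, heq, zero_add]
      -- B's fold peels (p, k) off the front
      rw [hchain, pv_dedup_decomp p k c hk1 hpc, ← hchain, List.foldl_cons, hcountp]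
      rw [PySem.List.foldl_congr_mem (PySem.List.dedup c)
        (fun d q => d.insert q ((PySem.List.count (pvChain spf fc x []) q : Int)))
        (fun d q => d.insert q ((PySem.List.count c q : Int)))
        (F.insert p ((k : Nat) : Int))
        (fun d q hq => by simp only [hcountq q ((PySem.List.mem_dedup c q).mp hq)])]
      -- remaining outer iterations = fold over the chain of y, by IH
      rw [ih y (F.insert p ((k : Nat) : Int)) fa y.toNat (by omega) (fun _ => by omega)
        (by omega) le_rfl ?cond]
      case cond =>
        intro q hq
        rw [PySem.Dict.contains_insert] at hq
        rcases Bool.or_eq_true_iff.mp hq with h | h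
        · have : q = p := by simpa using h
          subst this; exact hny
        · intro hqy
          exact hF q h (hqy.trans hydvd)
    · rw [pv_aLoop_exit spf x F h1, pv_chain_exit spf x [] h1]
      rfl

-- ===== VERDICT (by name: the statement is the Claim_ definition above) =====
theorem factorize_with_spf_py_spec : Claim_equal_factorize_with_spf_py := by
  intro x spf _ hpre
  unfold Spec_factorize_with_spf_py factorize_with_spf_py factorize_with_spf_py_alt
  by_cases h1 : 1 < x
  · rcases hpre with h | ⟨hxn, hg⟩
    · omega
    · refine congrArg PySem.Dict.items ?_
      exact pv_main spf hg (x.toNat) x PySem.Dict.empty (x.toNat + 1) (x.toNat + 1)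
        le_rfl (fun _ => hxn) (by omega) (by omega)
        (fun q hq => by rw [PySem.Dict.contains_empty] at hq; cases hq)
  · rw [pv_aLoop_exit spf x _ h1, pv_chain_exit spf x [] h1]
    rfl
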